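-- pv_equiv track=rewrite | github.com/le-kimpel/topological-obfuscation-detection | src/puffin.py | check_faces
-- ===== SOURCE A (Python) =====
-- def get_intersection(A, B):
--     '''
--     Gets the intersection of tuples
--     '''
--     return tuple(set(A) & set(B))
--
-- def check_faces(simplex):
--
--     for face in range(1, len(simplex)-1):
--         to_remove_face = []
--         to_remove_next_face = []
--         next_face = face + 1
--         prev_face = face - 1
--         for n in range(0, len(simplex[face])):
--             for m in range(0, len(simplex[next_face])):
--                 subset = get_intersection(simplex[face][n], simplex[next_face][m])
--                 if subset != ():
--                     if prev_face == 0: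
--                         subset = [subset[0]]
--                     if subset not in simplex[prev_face]:
--                         to_remove_face.append(simplex[face][n])
--                         to_remove_next_face.append(simplex[next_face][m])
--
--         for i in to_remove_face:
--             if i in simplex[face]:
--                 simplex[face].remove(i)
--         for j in to_remove_next_face:
--             if j in simplex[next_face]:
--                 simplex[next_face].remove(j)
--
--     return simplex
-- ===== SOURCE B (Python) =====
-- def check_faces(simplex):
--     for face in range(1, len(simplex) - 1):
--         prev = simplex[face - 1]
--         first = (face - 1 == 0)
--         cur, nxt = list(simplex[face]), list(simplex[face + 1])
--
--         def conflict(a, b):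
--             s = set(a) & set(b)
--             if not s:
--                 return False
--             probe = [tuple(s)[0]] if first else tuple(s)
--             return probe not in prev
--
--         simplex[face][:] = [a for a in cur if not any(conflict(a, b) for b in nxt)]
--         simplex[face + 1][:] = [b for b in nxt if not any(conflict(a, b) for a in cur)]
--     return simplex
-- ===== Notes on version B (the rewrite author's own statement) =====
-- stated objective: simpler
-- what changed: Replaces the removal-list accumulation plus two guarded .remove() deletion loops with per-element keep predicates: each of the two levels is rebuilt in one comprehension over a snapshot using any() over the other original level, assigned back with slice assignment to keep the in-place mutation.
import Mathlib
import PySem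

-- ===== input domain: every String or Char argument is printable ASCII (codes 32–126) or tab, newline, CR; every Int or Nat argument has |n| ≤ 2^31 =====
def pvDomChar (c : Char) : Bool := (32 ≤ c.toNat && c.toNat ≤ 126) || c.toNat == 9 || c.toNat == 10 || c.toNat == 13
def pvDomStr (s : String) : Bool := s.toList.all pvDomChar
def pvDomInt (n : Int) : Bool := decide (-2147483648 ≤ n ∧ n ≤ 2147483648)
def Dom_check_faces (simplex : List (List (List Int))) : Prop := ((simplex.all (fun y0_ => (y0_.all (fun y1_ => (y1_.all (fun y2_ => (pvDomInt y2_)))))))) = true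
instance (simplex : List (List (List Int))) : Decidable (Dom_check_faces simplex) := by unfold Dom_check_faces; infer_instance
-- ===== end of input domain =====

-- B rebuilds each level with per-element keep predicates (filter + any) instead of A's
-- removal-list accumulation followed by guarded .remove deletion loops (objective: simpler).
-- Both Pythons mutate `simplex` in place (B mirrors this via slice assignment); the theorem
-- below is about the returned value.


-- ===== PORT A =====
-- get_intersection(A, B) = tuple(set(A) & set(B)).  The ORDER of that tuple is a CPython
-- hash-order accident; this port resolves it as first-occurrence order of A (port B resolves
-- it differently); Pre_ below admits exactly the inputs where the choice cannot matter.
def get_intersection (A B : List Int) : List Int :=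
  PySem.Set.inter (PySem.Set.ofList A) (PySem.Set.ofList B)

-- one iteration of A's outer 'for face in range(1, len(simplex)-1)' loop
def check_faces_step (s : List (List (List Int))) (faceI : Int) : List (List (List Int)) :=
  let face : Nat := faceI.toNat
  let next_face : Nat := face + 1
  let prev_face : Nat := face - 1
  -- the index loops 'for n in range(0, len(simplex[face]))' / '… m …' read exactly the
  -- elements of the two lists in order
  let r :=
    (s.getD face []).foldl
      (fun (acc : List (List Int) × List (List Int)) fn =>
        (s.getD next_face []).foldl
          (fun acc fm =>
            let subset := get_intersection fn fm
            if subset ≠ [] then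
              -- 'if prev_face == 0: subset = [subset[0]]' then 'if subset not in simplex[prev_face]'.
              -- Exact for prev_face == 0: there the probe is a Python LIST compared against the
              -- TUPLES of simplex[0], so the membership test is always False (the branch appends).
              -- For prev_face ≠ 0 the tuple membership is ported with `subset` in the order
              -- picked above (exact under Pre_).
              if (if prev_face == 0 then false else (s.getD prev_face []).contains subset)
              then acc
              else (acc.1 ++ [fn], acc.2 ++ [fm])
            else acc)
          acc)
      ([], [])
  -- 'for i in to_remove_face: if i in simplex[face]: simplex[face].remove(i)' (and next_face alike)
  let cur' := r.1.foldl (fun xs i => if xs.contains i then (PySem.List.remove? xs i).getD xs else xs) (s.getD face [])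
  let nxt' := r.2.foldl (fun xs j => if xs.contains j then (PySem.List.remove? xs j).getD xs else xs) (s.getD next_face [])
  (s.set face cur').set next_face nxt'

def check_faces (simplex : List (List (List Int))) : List (List (List Int)) :=
  (PySem.List.pyRange 1 ((simplex.length : Int) - 1) 1).foldl check_faces_step simplex

-- ===== PORT B =====
-- s = set(a) & set(b); probe = [tuple(s)[0]] if first else tuple(s); probe not in prev.
-- The order of tuple(s) is the same CPython hash accident as in port A; this port resolves it
-- as first-occurrence order of b (exact under Pre_, where the choice cannot matter).
def conflict (first : Bool) (prev : List (List Int)) (a b : List Int) : Bool :=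
  let s := PySem.Set.inter (PySem.Set.ofList b) (PySem.Set.ofList a)
  if s = [] then false
  else if first then true  -- exact: the probe '[tuple(s)[0]]' is a list, never equal to the tuples in prev
  else !(prev.contains s)

-- one iteration of B's loop: rebuild the two levels by keep-predicates
def check_faces_alt_step (s : List (List (List Int))) (faceI : Int) : List (List (List Int)) :=
  let face : Nat := faceI.toNat
  let first := face - 1 == 0
  let prev := s.getD (face - 1) []
  let cur := s.getD face []
  let nxt := s.getD (face + 1) []
  (s.set face (cur.filter (fun a => !(nxt.any (fun b => conflict first prev a b))))).set
    (face + 1) (nxt.filter (fun b => !(cur.any (fun a => conflict first prev a b))))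

def check_faces_alt (simplex : List (List (List Int))) : List (List (List Int)) :=
  (PySem.List.pyRange 1 ((simplex.length : Int) - 1) 1).foldl check_faces_alt_step simplex

-- ===== PRECONDITION & SPEC =====
-- Pre_ excludes inputs whose result depends on CPython's set ITERATION order (a hash-order
-- accident neither port can reproduce): a pair of faces at consecutive levels ≥ 2 whose
-- intersection has several elements while the level below holds a tuple with exactly that
-- element set — whether `tuple(set(..) & set(..))` equals that tuple depends on hash order.
def Pre_check_faces (simplex : List (List (List Int))) : Prop :=
  ∀ f ∈ List.range simplex.length, 2 ≤ f →
    ∀ a ∈ simplex.getD f [], ∀ b ∈ simplex.getD (f + 1) [],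
      (∃ x ∈ a, x ∈ b ∧ ∃ y ∈ a, y ∈ b ∧ x ≠ y) →
      ∀ p ∈ simplex.getD (f - 1) [],
        ¬(p.Nodup ∧ (∀ x ∈ p, x ∈ a ∧ x ∈ b) ∧ (∀ x ∈ a, x ∈ b → x ∈ p))
instance (simplex : List (List (List Int))) : Decidable (Pre_check_faces simplex) := by unfold Pre_check_faces; infer_instance

def pvWitness_check_faces : List (List (List Int)) := [[[1]], [[1, 2]], [[2, 3]]]

def Spec_check_faces (simplex : List (List (List Int))) (out : List (List (List Int))) : Prop := out = check_faces_alt simplex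
instance (simplex : List (List (List Int))) (out : List (List (List Int))) : Decidable (Spec_check_faces simplex out) := by unfold Spec_check_faces; infer_instance

-- ===== CLAIM (what is proved, stated in full; the proofs are below) =====
def Claim_equal_check_faces : Prop := ∀ (simplex : List (List (List Int))), Dom_check_faces simplex → Pre_check_faces simplex → Spec_check_faces simplex (check_faces simplex)

-- ===== LEMMAS AND PROOFS =====

-- A's trigger as one predicate (mirrors `conflict`, but with A's intersection order)
def conflictA (first : Bool) (prev : List (List Int)) (a b : List Int) : Bool :=
  let s := get_intersection a b
  if s = [] then false
  else if first then true
  else !(prev.contains s)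

-- the guarded 'if i in xs: xs.remove(i)' of A is List.erase
theorem remove1_eq_erase (xs : List (List Int)) (i : List Int) :
    (if xs.contains i then (PySem.List.remove? xs i).getD xs else xs) = xs.erase i := by
  by_cases h : i ∈ xs
  · simp [h, PySem.List.remove?_eq_some_erase xs i h]
  · simp [h, List.erase_of_not_mem h]

-- a list with at most one occurrence of i: erasing i = filtering i out
theorem erase_eq_filter_of_count_le_one (l : List (List Int)) (i : List Int)
    (h : l.count i ≤ 1) : l.erase i = l.filter (fun x => !(x == i)) := by
  induction l with
  | nil => simp
  | cons x l ih =>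
    by_cases hx : x = i
    · subst hx
      have h0 : l.count x = 0 := by
        have := List.count_cons_self (a := x) (l := l); omega
      have hni : x ∉ l := List.count_eq_zero.1 h0
      have hf : l.filter (fun y => !(y == x)) = l := by
        apply List.filter_eq_self.2
        intro y hy
        have hyx : y ≠ x := fun hye => hni (hye ▸ hy)
        simp [hyx]
      simp [List.erase_cons_head, hf]
    · have hc : l.count i ≤ 1 := by
        have := List.count_cons_of_ne hx (l := l)
        omega
      have hbx : (x == i) = false := beq_eq_false_iff_ne.2 hx
      rw [List.erase_cons_tail (a := i) (b := x) (by simp [hbx]), ih hc, List.filter_cons]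
      simp [hbx]

-- A's guarded deletion pass collapses to one filter when every value in the removal list
-- occurs there at least as often as in the list being pruned
theorem foldl_erase_eq_filter (rem : List (List Int)) :
    ∀ xs : List (List Int),
      (∀ v, v ∈ xs → v ∈ rem → xs.count v ≤ rem.count v) →
      rem.foldl (fun ys i => ys.erase i) xs = xs.filter (fun x => !rem.contains x) := by
  induction rem with
  | nil => intro xs _; simp
  | cons i rem ih =>
    intro xs h
    simp only [List.foldl_cons]
    rw [ih (xs.erase i) ?_]
    · -- (xs.erase i).filter (!rem.contains ·) = xs.filter (!(i::rem).contains ·)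
      rw [← List.erase_filter]
      have hR : xs.filter (fun x => !(i :: rem).contains x)
          = (xs.filter (fun x => !rem.contains x)).filter (fun x => !(x == i)) := by
        rw [List.filter_filter]
        apply List.filter_congr
        intro x _
        simp only [List.contains_cons, Bool.not_or]
      rw [hR]
      apply erase_eq_filter_of_count_le_one
      by_cases hir : i ∈ rem
      · have hni : i ∉ xs.filter (fun x => !rem.contains x) := by
          simp [List.mem_filter, List.contains_eq_mem, hir]
        exact le_trans (Nat.le_of_eq (List.count_eq_zero.2 hni)) (by omega)
      · have hx1 : xs.count i ≤ 1 := by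
          by_cases hix : i ∈ xs
          · have h1 := h i hix (List.mem_cons_self)
            have h2 : (i :: rem).count i = rem.count i + 1 := List.count_cons_self
            have h0 : rem.count i = 0 := List.count_eq_zero.2 hir
            omega
          · exact le_trans (Nat.le_of_eq (List.count_eq_zero.2 hix)) (by omega)
        exact le_trans ((List.filter_sublist (p := fun x => !rem.contains x) (l := xs)).count_le i) hx1
    · intro v hv hvr
      have hvx : v ∈ xs := List.mem_of_mem_erase hv
      have h1 := h v hvx (List.mem_cons_of_mem _ hvr)
      by_cases hiv : i = v
      · subst hiv
        have h2 : (i :: rem).count i = rem.count i + 1 := List.count_cons_self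
        have h3 : (xs.erase i).count i = xs.count i - 1 := List.count_erase_self
        omega
      · have h2 : (i :: rem).count v = rem.count v := List.count_cons_of_ne hiv
        have h3 : (xs.erase i).count v = xs.count v := by
          rw [List.count_erase]; simp [beq_eq_false_iff_ne.2 hiv]
        omega

-- inner loop of A: one row of the removal-pair accumulation
theorem inner_fold_eq (t : List Int → List Int → Bool) (a : List Int) (nxt : List (List Int)) :
    ∀ p q : List (List Int),
      nxt.foldl (fun acc b => if t a b then (acc.1 ++ [a], acc.2 ++ [b]) else acc) (p, q)
      = (p ++ (nxt.filter (t a)).map (fun _ => a), q ++ nxt.filter (t a)) := by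
  induction nxt with
  | nil => intro p q; simp
  | cons b nxt ih =>
    intro p q
    by_cases hb : t a b
    · simp [hb, ih, List.append_assoc]
    · simp [hb, ih]

-- the whole double loop of A as two flatMaps
theorem outer_fold_eq (t : List Int → List Int → Bool) (nxt : List (List Int)) (cur : List (List Int)) :
    ∀ p q : List (List Int),
      cur.foldl (fun acc fn =>
        nxt.foldl (fun acc b => if t fn b then (acc.1 ++ [fn], acc.2 ++ [b]) else acc) acc) (p, q)
      = (p ++ cur.flatMap (fun a => (nxt.filter (t a)).map (fun _ => a)),
         q ++ cur.flatMap (fun a => nxt.filter (t a))) := by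
  induction cur with
  | nil => intro p q; simp
  | cons a cur ih =>
    intro p q
    simp only [List.foldl_cons, inner_fold_eq, ih, List.flatMap_cons, List.append_assoc]

theorem count_rf (t : List Int → List Int → Bool) (nxt : List (List Int)) (cur : List (List Int)) (v : List Int) :
    (cur.flatMap (fun a => (nxt.filter (t a)).map (fun _ => a))).count v
      = cur.count v * nxt.countP (t v) := by
  induction cur with
  | nil => simp
  | cons a cur ih =>
    rw [List.flatMap_cons, List.count_append, ih]
    rw [List.map_const', List.count_replicate, ← List.countP_eq_length_filter]
    by_cases hav : a = v
    · subst hav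
      rw [List.count_cons_self]
      simp only [BEq.rfl, if_true]
      ring
    · rw [List.count_cons_of_ne hav]
      simp only [beq_eq_false_iff_ne.2 hav, Bool.false_eq_true, if_false]
      omega

theorem count_rn (t : List Int → List Int → Bool) (nxt : List (List Int)) (cur : List (List Int)) (v : List Int) :
    (cur.flatMap (fun a => nxt.filter (t a))).count v
      = cur.countP (fun a => t a v) * nxt.count v := by
  induction cur with
  | nil => simp
  | cons a cur ih =>
    rw [List.flatMap_cons, List.count_append, ih, List.countP_cons]
    by_cases ht : t a v
    · rw [List.count_filter ht]
      simp only [ht, if_true]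
      ring
    · have hz : (nxt.filter (t a)).count v = 0 := by
        apply List.count_eq_zero.2
        intro hm
        exact ht (List.mem_filter.1 hm).2
      simp [hz, ht]

-- face-side: A's accumulate-then-delete equals a keep-filter
theorem removeFace_eq (t : List Int → List Int → Bool) (cur nxt : List (List Int)) :
    (cur.flatMap (fun a => (nxt.filter (t a)).map (fun _ => a))).foldl (fun ys i => ys.erase i) cur
      = cur.filter (fun a => !(nxt.any (fun b => t a b))) := by
  rw [foldl_erase_eq_filter _ cur ?_]
  · apply List.filter_congr
    intro a ha
    congr 1
    rw [Bool.eq_iff_iff]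
    simp only [List.contains_eq_mem, decide_eq_true_eq, List.any_eq_true, List.mem_flatMap,
      List.mem_map, List.mem_filter]
    constructor
    · rintro ⟨a', ha', b, ⟨hb, htb⟩, rfl⟩
      exact ⟨b, hb, htb⟩
    · rintro ⟨b, hb, htb⟩
      exact ⟨a, ha, b, ⟨hb, htb⟩, rfl⟩
  · intro v hv hvm
    rw [count_rf]
    have hpos : 0 < nxt.countP (t v) := by
      simp only [List.mem_flatMap, List.mem_map, List.mem_filter] at hvm
      obtain ⟨a', ha', b, ⟨hb, htb⟩, rfl⟩ := hvm
      exact List.countP_pos_iff.2 ⟨b, hb, htb⟩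
    exact Nat.le_mul_of_pos_right _ hpos

-- next-face side
theorem removeNext_eq (t : List Int → List Int → Bool) (cur nxt : List (List Int)) :
    (cur.flatMap (fun a => nxt.filter (t a))).foldl (fun ys i => ys.erase i) nxt
      = nxt.filter (fun b => !(cur.any (fun a => t a b))) := by
  rw [foldl_erase_eq_filter _ nxt ?_]
  · apply List.filter_congr
    intro b hb
    congr 1
    rw [Bool.eq_iff_iff]
    simp only [List.contains_eq_mem, decide_eq_true_eq, List.any_eq_true, List.mem_flatMap,
      List.mem_filter]
    constructor
    · rintro ⟨a, ha, _, htb⟩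
      exact ⟨a, ha, htb⟩
    · rintro ⟨a, ha, htb⟩
      exact ⟨a, ha, hb, htb⟩
  · intro v hv hvm
    rw [count_rn]
    have hpos : 0 < cur.countP (fun a => t a v) := by
      simp only [List.mem_flatMap, List.mem_filter] at hvm
      obtain ⟨a, ha, _, htb⟩ := hvm
      exact List.countP_pos_iff.2 ⟨a, ha, htb⟩
    exact Nat.le_mul_of_pos_left _ hpos

-- A's nested conditions are exactly the conflictA predicate
theorem cond_eq (pf : Nat) (prev : List (List Int)) (a b : List Int)
    (acc : List (List Int) × List (List Int)) :
    (if get_intersection a b ≠ [] then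
       (if (if pf == 0 then false else prev.contains (get_intersection a b))
        then acc else (acc.1 ++ [a], acc.2 ++ [b]))
     else acc)
    = if conflictA (pf == 0) prev a b then (acc.1 ++ [a], acc.2 ++ [b]) else acc := by
  unfold conflictA
  by_cases hs : get_intersection a b = ([] : List Int)
  · simp [hs]
  · by_cases hp : (pf == 0) = true
    · simp [hs, hp]
    · simp only [Bool.not_eq_true] at hp
      simp [hs, hp]

-- A's step in keep-filter form
theorem stepA_eq (s : List (List (List Int))) (faceI : Int) :
    check_faces_step s faceI =
      ((s.set faceI.toNat ((s.getD faceI.toNat []).filter (fun a =>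
          !((s.getD (faceI.toNat + 1) []).any (fun b =>
            conflictA (faceI.toNat - 1 == 0) (s.getD (faceI.toNat - 1) []) a b))))).set
        (faceI.toNat + 1)
        ((s.getD (faceI.toNat + 1) []).filter (fun b =>
          !((s.getD faceI.toNat []).any (fun a =>
            conflictA (faceI.toNat - 1 == 0) (s.getD (faceI.toNat - 1) []) a b))))) := by
  unfold check_faces_step
  simp only [cond_eq, remove1_eq_erase, outer_fold_eq, List.nil_append]
  rw [removeFace_eq, removeNext_eq]

-- a nodup list whose members all equal x, containing x, is [x]
theorem eq_singleton_of_unique_mem (l : List Int) (x : Int) (hx : x ∈ l)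
    (hu : ∀ y ∈ l, y = x) (hnd : l.Nodup) : l = [x] := by
  cases l with
  | nil => cases hx
  | cons z l' =>
    have hz : z = x := hu z List.mem_cons_self
    subst hz
    cases l' with
    | nil => rfl
    | cons w l'' =>
      have hw : w = z := hu w (by simp)
      subst hw
      simp at hnd

-- the two resolutions of the intersection order coincide wherever Pre_'s condition holds
theorem conflict_eq (first : Bool) (prev : List (List Int)) (a b : List Int)
    (h : (first = false) →
      (∃ x ∈ a, x ∈ b ∧ ∃ y ∈ a, y ∈ b ∧ x ≠ y) →
      ∀ p ∈ prev, ¬(p.Nodup ∧ (∀ x ∈ p, x ∈ a ∧ x ∈ b) ∧ (∀ x ∈ a, x ∈ b → x ∈ p))) :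
    conflictA first prev a b = conflict first prev a b := by
  unfold conflictA conflict get_intersection
  have hmA : ∀ x, x ∈ PySem.Set.inter (PySem.Set.ofList a) (PySem.Set.ofList b) ↔ x ∈ a ∧ x ∈ b := by
    intro x
    rw [PySem.Set.mem_inter, PySem.Set.mem_ofList, PySem.Set.mem_ofList]
  have hmB : ∀ x, x ∈ PySem.Set.inter (PySem.Set.ofList b) (PySem.Set.ofList a) ↔ x ∈ a ∧ x ∈ b := by
    intro x
    rw [PySem.Set.mem_inter, PySem.Set.mem_ofList, PySem.Set.mem_ofList, and_comm]
  by_cases hA : PySem.Set.inter (PySem.Set.ofList a) (PySem.Set.ofList b) = ([] : List Int)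
  · have hB : PySem.Set.inter (PySem.Set.ofList b) (PySem.Set.ofList a) = ([] : List Int) := by
      rw [List.eq_nil_iff_forall_not_mem] at hA ⊢
      intro x hx
      exact hA x ((hmA x).2 ((hmB x).1 hx))
    simp [hA, hB]
  · have hB : PySem.Set.inter (PySem.Set.ofList b) (PySem.Set.ofList a) ≠ ([] : List Int) := by
      intro hB
      rw [List.eq_nil_iff_forall_not_mem] at hA hB
      apply hA
      intro x hx
      exact hB x ((hmB x).2 ((hmA x).1 hx))
    cases first with
    | true => simp [hA, hB]
    | false =>
      have h' := h rfl
      by_cases h2 : ∃ x ∈ a, x ∈ b ∧ ∃ y ∈ a, y ∈ b ∧ x ≠ y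
      · -- several common elements: neither ordering can be in prev
        have hp := h' h2
        have hcA : PySem.Set.inter (PySem.Set.ofList a) (PySem.Set.ofList b) ∉ prev := by
          intro hmem
          exact hp _ hmem ⟨PySem.Set.nodup_inter _ _ (PySem.Set.nodup_ofList a),
            fun x hx => (hmA x).1 hx, fun x hxa hxb => (hmA x).2 ⟨hxa, hxb⟩⟩
        have hcB : PySem.Set.inter (PySem.Set.ofList b) (PySem.Set.ofList a) ∉ prev := by
          intro hmem
          exact hp _ hmem ⟨PySem.Set.nodup_inter _ _ (PySem.Set.nodup_ofList b),
            fun x hx => (hmB x).1 hx, fun x hxa hxb => (hmB x).2 ⟨hxa, hxb⟩⟩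
        simp [hA, hB, hcA, hcB]
      · -- a single common element: the two orderings are the same singleton
        push Not at h2
        obtain ⟨x, hx⟩ := List.exists_mem_of_ne_nil _ hA
        have hxab := (hmA x).1 hx
        have huniq : ∀ y, y ∈ a → y ∈ b → y = x :=
          fun y hya hyb => (h2 x hxab.1 hxab.2 y hya hyb).symm
        have hsA : PySem.Set.inter (PySem.Set.ofList a) (PySem.Set.ofList b) = [x] :=
          eq_singleton_of_unique_mem _ x hx
            (fun y hy => huniq y ((hmA y).1 hy).1 ((hmA y).1 hy).2)
            (PySem.Set.nodup_inter _ _ (PySem.Set.nodup_ofList a))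
        have hsB : PySem.Set.inter (PySem.Set.ofList b) (PySem.Set.ofList a) = [x] :=
          eq_singleton_of_unique_mem _ x ((hmB x).2 hxab)
            (fun y hy => huniq y ((hmB y).1 hy).1 ((hmB y).1 hy).2)
            (PySem.Set.nodup_inter _ _ (PySem.Set.nodup_ofList b))
        rw [hsA, hsB]

theorem getD_set_ne (st : List (List (List Int))) (k j : Nat) (v : List (List Int))
    (h : j ≠ k) : (st.set k v).getD j [] = st.getD j [] := by
  rw [List.getD_eq_getElem?_getD, List.getElem?_set_ne (fun e => h e.symm),
    ← List.getD_eq_getElem?_getD]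

-- setting an index to a sublist of its old value only shrinks every level (w.r.t. Sublist)
theorem getD_set_sublist (st : List (List (List Int))) (k : Nat) (v : List (List Int))
    (hv : v.Sublist (st.getD k [])) (j : Nat) :
    ((st.set k v).getD j []).Sublist (st.getD j []) := by
  by_cases hjk : j = k
  · subst hjk
    by_cases hk : j < st.length
    · rw [List.getD_eq_getElem?_getD, List.getElem?_set_self hk]
      simpa using hv
    · rw [List.set_eq_of_length_le (Nat.le_of_not_lt hk)]
  · rw [getD_set_ne st k j v hjk]

-- the per-step congruence: under Pre_ (through the sublist invariant) A's step is B's step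
theorem step_congr (simplex : List (List (List Int))) (hpre : Pre_check_faces simplex)
    (st : List (List (List Int)))
    (hsub : ∀ j, (st.getD j []).Sublist (simplex.getD j [])) (faceI : Int) :
    check_faces_step st faceI = check_faces_alt_step st faceI := by
  rw [stepA_eq]
  have key : ∀ a ∈ st.getD faceI.toNat [], ∀ b ∈ st.getD (faceI.toNat + 1) [],
      conflictA (faceI.toNat - 1 == 0) (st.getD (faceI.toNat - 1) []) a b
        = conflict (faceI.toNat - 1 == 0) (st.getD (faceI.toNat - 1) []) a b := by
    intro a ha b hb
    apply conflict_eq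
    intro hfirst h2 p hp
    have hf2 : 2 ≤ faceI.toNat := by
      by_contra hlt
      have h0 : faceI.toNat - 1 = 0 := by omega
      simp [h0] at hfirst
    have hflen : faceI.toNat < simplex.length := by
      by_contra hge
      have he : simplex.getD faceI.toNat [] = [] :=
        List.getD_eq_default _ _ (Nat.le_of_not_lt hge)
      have := (hsub faceI.toNat).subset ha
      simp_all
    exact hpre faceI.toNat (List.mem_range.2 hflen) hf2
      a ((hsub faceI.toNat).subset ha)
      b ((hsub (faceI.toNat + 1)).subset hb) h2
      p ((hsub (faceI.toNat - 1)).subset hp)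
  unfold check_faces_alt_step
  have h1 : (st.getD faceI.toNat []).filter (fun a =>
        !((st.getD (faceI.toNat + 1) []).any (fun b =>
          conflictA (faceI.toNat - 1 == 0) (st.getD (faceI.toNat - 1) []) a b)))
      = (st.getD faceI.toNat []).filter (fun a =>
        !((st.getD (faceI.toNat + 1) []).any (fun b =>
          conflict (faceI.toNat - 1 == 0) (st.getD (faceI.toNat - 1) []) a b))) := by
    apply List.filter_congr
    intro a ha
    congr 1
    rw [Bool.eq_iff_iff]
    simp only [List.any_eq_true]
    constructor <;> rintro ⟨b, hb, hcb⟩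
    · exact ⟨b, hb, by rw [key a ha b hb] at hcb; exact hcb⟩
    · exact ⟨b, hb, by rw [← key a ha b hb] at hcb; exact hcb⟩
  have h2 : (st.getD (faceI.toNat + 1) []).filter (fun b =>
        !((st.getD faceI.toNat []).any (fun a =>
          conflictA (faceI.toNat - 1 == 0) (st.getD (faceI.toNat - 1) []) a b)))
      = (st.getD (faceI.toNat + 1) []).filter (fun b =>
        !((st.getD faceI.toNat []).any (fun a =>
          conflict (faceI.toNat - 1 == 0) (st.getD (faceI.toNat - 1) []) a b))) := by
    apply List.filter_congr
    intro b hb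
    congr 1
    rw [Bool.eq_iff_iff]
    simp only [List.any_eq_true]
    constructor <;> rintro ⟨a, ha, hcb⟩
    · exact ⟨a, ha, by rw [key a ha b hb] at hcb; exact hcb⟩
    · exact ⟨a, ha, by rw [← key a ha b hb] at hcb; exact hcb⟩
  rw [h1, h2]

-- B's step keeps every level a sublist of what it was
theorem step_sub (st : List (List (List Int))) (faceI : Int) (j : Nat) :
    ((check_faces_alt_step st faceI).getD j []).Sublist (st.getD j []) := by
  unfold check_faces_alt_step
  refine List.Sublist.trans (getD_set_sublist _ _ _ ?_ j) (getD_set_sublist _ _ _ List.filter_sublist j)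
  rw [getD_set_ne _ _ _ _ (Nat.succ_ne_self faceI.toNat)]
  exact List.filter_sublist

-- the two folds agree step by step
theorem fold_eq (simplex : List (List (List Int))) (hpre : Pre_check_faces simplex)
    (fs : List Int) :
    ∀ st : List (List (List Int)), (∀ j, (st.getD j []).Sublist (simplex.getD j [])) →
      fs.foldl check_faces_step st = fs.foldl check_faces_alt_step st := by
  induction fs with
  | nil => intro st _; rfl
  | cons f fs ih =>
    intro st hsub
    rw [List.foldl_cons, List.foldl_cons, step_congr simplex hpre st hsub f]
    exact ih _ (fun j => (step_sub st f j).trans (hsub j))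

-- ===== VERDICT (by name: the statement is the Claim_ definition above) =====
theorem check_faces_spec : Claim_equal_check_faces := by
  intro simplex _ hpre
  unfold Spec_check_faces check_faces check_faces_alt
  exact fold_eq simplex hpre _ simplex (fun j => List.Sublist.refl _)
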